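-- pv_equiv track=rewrite | github.com/chris-peng-1244/python-quiz | mergesort.py | mergeSortHelper
-- ===== SOURCE A (Python) =====
-- def mergeSortHelper(array, left, right):
--   if left == right:
--     return [array[left]]
--
--   mid = (left + right) // 2
--   sortedLeft = mergeSortHelper(array, left, mid)
--   sortedRight = mergeSortHelper(array, mid+1, right)
--
--   sortedArray = []
--   leftIndex = rightIndex = 0
--   while leftIndex < len(sortedLeft) and rightIndex < len(sortedRight):
--     if sortedLeft[leftIndex] <= sortedRight[rightIndex]:
--       sortedArray.append(sortedLeft[leftIndex])
--       leftIndex += 1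
--     else:
--       sortedArray.append(sortedRight[rightIndex])
--       rightIndex += 1
--
--   if leftIndex != len(sortedLeft):
--     for i in range(leftIndex, len(sortedLeft)):
--       sortedArray.append(sortedLeft[i])
--
--   if rightIndex != len(sortedRight):
--     for i in range(rightIndex, len(sortedRight)):
--       sortedArray.append(sortedRight[i])
--   return sortedArray
-- ===== SOURCE B (Python) =====
-- def mergeSortHelper(array, left, right):
--     return sorted(array[i] for i in range(left, right + 1))
-- ===== Notes on version B (the rewrite author's own statement) =====
-- stated objective: idiomatic
-- what changed: Replaces the hand-written recursive merge sort over index ranges with a single call to the built-in stable sort (C-implemented Timsort) applied to the selected elements.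
-- crash fix: On inputs with left > right, A recurses forever on the empty range and raises RecursionError, while B returns the sorted empty selection []. — e.g. on mergeSortHelper([], 0, -1): A raises RecursionError, B returns []
import Mathlib
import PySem

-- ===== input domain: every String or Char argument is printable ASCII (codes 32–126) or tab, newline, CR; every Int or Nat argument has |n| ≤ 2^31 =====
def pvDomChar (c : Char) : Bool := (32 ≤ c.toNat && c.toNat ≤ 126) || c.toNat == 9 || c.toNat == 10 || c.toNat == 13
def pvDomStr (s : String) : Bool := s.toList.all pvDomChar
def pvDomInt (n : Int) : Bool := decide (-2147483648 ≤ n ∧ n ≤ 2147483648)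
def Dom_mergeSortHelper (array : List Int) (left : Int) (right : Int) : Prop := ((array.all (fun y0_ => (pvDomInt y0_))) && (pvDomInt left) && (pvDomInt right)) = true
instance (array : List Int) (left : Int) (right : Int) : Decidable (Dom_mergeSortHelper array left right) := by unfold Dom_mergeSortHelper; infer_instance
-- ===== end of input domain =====

-- B replaces A's hand-written recursive merge sort by the idiomatic built-in stable sort of the selected slice (return value only; same cost class).


-- ===== PORT A =====
-- the while loop and the two trailing copy loops of A, rendered as structural recursion on the two suffixes
def pvMergeA : List Int → List Int → List Int
  | xs, [] => xs
  | [], ys => ys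
  | x :: xs, y :: ys =>
    if x ≤ y then x :: pvMergeA xs (y :: ys) else y :: pvMergeA (x :: xs) ys

-- A's recursion, with fuel only to make it total (A diverges when left > right; Pre_ excludes that)
def mergeSortGo : Nat → List Int → Int → Int → List Int
  | 0, _, _, _ => []
  | fuel + 1, array, left, right =>
    if left = right then [PySem.List.pyGetD array left 0]
    else
      let mid := PySem.Int.floordiv (left + right) 2
      pvMergeA (mergeSortGo fuel array left mid) (mergeSortGo fuel array (mid + 1) right)

def mergeSortHelper (array : List Int) (left : Int) (right : Int) : List Int :=
  mergeSortGo ((right - left).toNat + 1) array left right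

-- ===== PORT B =====
def mergeSortHelper_alt (array : List Int) (left : Int) (right : Int) : List Int :=
  PySem.List.sorted
    ((PySem.List.pyRange left (right + 1) 1).map (fun i => PySem.List.pyGetD array i 0))
    (fun x => x) false

-- ===== PRECONDITION & SPEC =====
-- exactly the inputs on which the Python A returns: a nonempty index range whose every index is valid
def Pre_mergeSortHelper (array : List Int) (left : Int) (right : Int) : Prop :=
  left ≤ right ∧ -(array.length : Int) ≤ left ∧ right < (array.length : Int)
instance (array : List Int) (left : Int) (right : Int) : Decidable (Pre_mergeSortHelper array left right) := by unfold Pre_mergeSortHelper; infer_instance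
def pvWitness_mergeSortHelper : List Int × Int × Int := ([3, 1, 2, 1], 0, 3)

-- On inputs with left > right, A recurses forever on the empty range and raises RecursionError, while B returns the sorted empty selection [].
def Raises_mergeSortHelper (array : List Int) (left : Int) (right : Int) : Prop := right < left
instance (array : List Int) (left : Int) (right : Int) : Decidable (Raises_mergeSortHelper array left right) := by unfold Raises_mergeSortHelper; infer_instance
def pvRaiseWitness_mergeSortHelper : List Int × Int × Int := ([], 0, -1)
def pvRaiseWitnessOut_mergeSortHelper : List Int := []

def Spec_mergeSortHelper (array : List Int) (left : Int) (right : Int) (out : List Int) : Prop := out = mergeSortHelper_alt array left right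
instance (array : List Int) (left : Int) (right : Int) (out : List Int) : Decidable (Spec_mergeSortHelper array left right out) := by unfold Spec_mergeSortHelper; infer_instance

-- ===== CLAIM (what is proved, stated in full; the proofs are below) =====
def Claim_equal_mergeSortHelper : Prop := ∀ (array : List Int) (left : Int) (right : Int), Dom_mergeSortHelper array left right → Pre_mergeSortHelper array left right → Spec_mergeSortHelper array left right (mergeSortHelper array left right)
def Claim_raises_mergeSortHelper : Prop := (∀ (array : List Int) (left : Int) (right : Int), Dom_mergeSortHelper array left right → Raises_mergeSortHelper array left right → ¬ Pre_mergeSortHelper array left right) ∧ (Dom_mergeSortHelper (pvRaiseWitness_mergeSortHelper.1) (pvRaiseWitness_mergeSortHelper.2.1) (pvRaiseWitness_mergeSortHelper.2.2) ∧ Raises_mergeSortHelper (pvRaiseWitness_mergeSortHelper.1) (pvRaiseWitness_mergeSortHelper.2.1) (pvRaiseWitness_mergeSortHelper.2.2) ∧ mergeSortHelper_alt (pvRaiseWitness_mergeSortHelper.1) (pvRaiseWitness_mergeSortHelper.2.1) (pvRaiseWitness_mergeSortHelper.2.2) = pvRaiseWitnessOut_mergeSortHelper)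

-- ===== LEMMAS AND PROOFS =====

-- the elements A and B work on: array[i] for i in [left, right]
def pvElems (array : List Int) (left right : Int) : List Int :=
  (PySem.List.pyRange left (right + 1) 1).map (fun i => PySem.List.pyGetD array i 0)

theorem pvMergeA_perm (xs ys : List Int) : (pvMergeA xs ys).Perm (xs ++ ys) := by
  fun_induction pvMergeA with
  | case1 xs => simp [List.Perm.refl]
  | case2 ys => simp [List.Perm.refl]
  | case3 x xs y ys h ih => exact (ih.cons x).trans (List.Perm.refl _)
  | case4 x xs y ys h ih => exact (ih.cons y).trans List.perm_middle.symm

theorem pvMergeA_pairwise (xs ys : List Int)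
    (hx : xs.Pairwise (· ≤ ·)) (hy : ys.Pairwise (· ≤ ·)) :
    (pvMergeA xs ys).Pairwise (· ≤ ·) := by
  fun_induction pvMergeA with
  | case1 xs => exact hx
  | case2 ys => exact hy
  | case3 x xs y ys h ih =>
    rcases List.pairwise_cons.mp hx with ⟨hx1, hx2⟩
    refine List.pairwise_cons.mpr ⟨?_, ih hx2 hy⟩
    intro z hz
    have hz' : z ∈ xs ++ (y :: ys) := (pvMergeA_perm xs (y :: ys)).mem_iff.mp hz
    rcases List.mem_append.mp hz' with hz1 | hz2
    · exact hx1 z hz1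
    · rcases List.mem_cons.mp hz2 with rfl | hz3
      · exact h
      · exact le_trans h ((List.pairwise_cons.mp hy).1 z hz3)
  | case4 x xs y ys h ih =>
    rcases List.pairwise_cons.mp hy with ⟨hy1, hy2⟩
    refine List.pairwise_cons.mpr ⟨?_, ih hx hy2⟩
    intro z hz
    have hz' : z ∈ (x :: xs) ++ ys := (pvMergeA_perm (x :: xs) ys).mem_iff.mp hz
    have hyx : y ≤ x := le_of_not_ge (by omega)
    rcases List.mem_append.mp hz' with hz1 | hz2
    · rcases List.mem_cons.mp hz1 with rfl | hz3
      · exact hyx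
      · exact le_trans hyx ((List.pairwise_cons.mp hx).1 z hz3)
    · exact hy1 z hz2

theorem pvElems_split (array : List Int) (left mid right : Int)
    (h1 : left ≤ mid) (h2 : mid ≤ right) :
    pvElems array left right = pvElems array left mid ++ pvElems array (mid + 1) right := by
  unfold pvElems
  rw [PySem.List.pyRange_one_append left (mid + 1) (right + 1) (by omega) (by omega), List.map_append]

theorem mergeSortGo_spec (fuel : Nat) :
    ∀ (array : List Int) (left right : Int), left ≤ right → (right - left).toNat < fuel →
    (mergeSortGo fuel array left right).Perm (pvElems array left right) ∧
    (mergeSortGo fuel array left right).Pairwise (· ≤ ·) := by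
  induction fuel with
  | zero => intro _ _ _ _ hf; omega
  | succ fuel ih =>
    intro array left right hlr hf
    by_cases heq : left = right
    · subst heq
      have hr : PySem.List.pyRange left (left + 1) 1 = [left] :=
        PySem.List.pyRange_one_singleton left
      simp [mergeSortGo, pvElems, hr]
    · have hlt : left < right := by omega
      have hmid : PySem.Int.floordiv (left + right) 2 = (left + right) / 2 :=
        PySem.Int.floordiv_eq_ediv_of_pos (by omega)
      have hb1 : left ≤ PySem.Int.floordiv (left + right) 2 := by rw [hmid]; omega
      have hb2 : PySem.Int.floordiv (left + right) 2 < right := by rw [hmid]; omega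
      have ihL := ih array left (PySem.Int.floordiv (left + right) 2) hb1 (by rw [hmid] at hb1 hb2 ⊢; omega)
      have ihR := ih array (PySem.Int.floordiv (left + right) 2 + 1) right (by rw [hmid] at hb1 hb2 ⊢; omega) (by rw [hmid] at hb1 hb2 ⊢; omega)
      have hgo : mergeSortGo (fuel + 1) array left right =
          pvMergeA (mergeSortGo fuel array left (PySem.Int.floordiv (left + right) 2))
            (mergeSortGo fuel array (PySem.Int.floordiv (left + right) 2 + 1) right) := by
        simp only [mergeSortGo, if_neg heq]
      rw [hgo]
      constructor
      · refine (pvMergeA_perm _ _).trans ?_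
        rw [pvElems_split array left (PySem.Int.floordiv (left + right) 2) right hb1 (by rw [hmid]; omega)]
        exact ihL.1.append ihR.1
      · exact pvMergeA_pairwise _ _ ihL.2 ihR.2

-- ===== VERDICT (by name: the statement is the Claim_ definition above) =====
theorem mergeSortHelper_spec : Claim_equal_mergeSortHelper := by
  intro array left right _ hpre
  obtain ⟨hlr, _, _⟩ := hpre
  have h := mergeSortGo_spec ((right - left).toNat + 1) array left right hlr (by omega)
  unfold Spec_mergeSortHelper mergeSortHelper_alt
  exact (PySem.List.sorted_id_eq_of_perm_of_pairwise _ _ h.1 h.2).symm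

@[simp] theorem mergeSortHelper_raises : Claim_raises_mergeSortHelper := by
  unfold Claim_raises_mergeSortHelper
  refine ⟨?_, by decide⟩
  intro array left right _ hr hpre
  exact absurd hpre.1 (by unfold Raises_mergeSortHelper at hr; omega)
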